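-- pv_equiv track=rewrite | github.com/Kiefer-Networks/Licence-Manager | backend/src/licence_api/utils/domain_check.py | is_company_email
-- ===== SOURCE A (Python) =====
-- def is_company_email(email: str, company_domains: list[str]) -> bool:
--     """Check if an email belongs to the company domains.
--
--     Supports both exact domain matches and subdomain matches.
--     E.g., for company_domain "firma.de", matches both:
--     - user@firma.de (exact)
--     - user@sub.firma.de (subdomain)
--
--     Args:
--         email: Email address to check
--         company_domains: List of company domain names (e.g., ["firma.de", "firma.com"])
--
--     Returns:
--         True if the email domain matches one of the company domains
--     """
--     if not email or "@" not in email: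
--         return False
--
--     domain = email.split("@")[-1].lower()
--
--     for company_domain in company_domains:
--         cd = company_domain.lower()
--         # Exact match or subdomain match
--         if domain == cd or domain.endswith("." + cd):
--             return True
--
--     return False
-- ===== SOURCE B (Python) =====
-- def is_company_email(email: str, company_domains: list[str]) -> bool:
--     """Check if an email belongs to the company domains (exact or subdomain match)."""
--     if not email or "@" not in email:
--         return False
--     domain = email.split("@")[-1].lower()
--     cd_set = {c.lower() for c in company_domains}
--     parts = domain.split(".")
--     return any(".".join(parts[i:]) in cd_set for i in range(len(parts)))
-- ===== Notes on version B (the rewrite author's own statement) =====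
-- stated objective: alternative
-- what changed: Instead of scanning company_domains and testing endswith for each, B builds a set of lowered company domains once and checks membership of each dot-boundary suffix of the email's domain.
import Mathlib
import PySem

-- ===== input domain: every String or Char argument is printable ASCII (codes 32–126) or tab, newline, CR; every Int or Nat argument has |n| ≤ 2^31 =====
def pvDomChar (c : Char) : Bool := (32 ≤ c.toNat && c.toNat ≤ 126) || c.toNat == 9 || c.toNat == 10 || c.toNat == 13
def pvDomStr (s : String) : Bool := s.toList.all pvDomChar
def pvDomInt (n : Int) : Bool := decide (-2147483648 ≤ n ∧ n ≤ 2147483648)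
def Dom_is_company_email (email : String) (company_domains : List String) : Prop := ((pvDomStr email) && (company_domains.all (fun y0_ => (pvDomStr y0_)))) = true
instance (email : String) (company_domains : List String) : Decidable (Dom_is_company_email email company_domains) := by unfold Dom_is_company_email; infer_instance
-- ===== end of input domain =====

-- B replaces A's scan of company_domains (endswith test per domain) by one pass over the
-- dot-boundary suffixes of the email's domain with membership in a set built once (alternative decomposition).

-- ===== PORT A =====
-- A: guard, lowercase the part after the last '@', then scan company_domains with an
-- early-return loop (ported as List.any): exact match or '.'+cd suffix match.
-- email.split("@")[-1]: splitOn never returns [], so Python's [-1] never raises; ported as pyGetD _ (-1) [].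
def is_company_email (email : String) (company_domains : List String) : Bool :=
  if email.toList.isEmpty || !(PySem.Chars.isIn ['@'] email.toList) then false
  else
    let domain := PySem.Chars.lower (PySem.List.pyGetD (PySem.Chars.splitOn email.toList ['@']) (-1) [])
    company_domains.any (fun company_domain =>
      let cd := PySem.Chars.lower company_domain.toList
      domain == cd || PySem.Chars.endswith domain ('.' :: cd))

-- ===== PORT B =====
-- B: same guard and domain extraction; build the set of lowered company domains once,
-- split the domain on '.', and test each dot-boundary suffix for set membership.
def is_company_email_alt (email : String) (company_domains : List String) : Bool :=
  if email.toList.isEmpty || !(PySem.Chars.isIn ['@'] email.toList) then false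
  else
    let domain := PySem.Chars.lower (PySem.List.pyGetD (PySem.Chars.splitOn email.toList ['@']) (-1) [])
    let cdSet : PySem.Set (List Char) :=
      PySem.Set.ofList (company_domains.map (fun c => PySem.Chars.lower c.toList))
    let parts := PySem.Chars.splitOn domain ['.']
    (PySem.List.pyRange 0 (parts.length : Int) 1).any (fun i =>
      PySem.Set.contains cdSet (PySem.Chars.join ['.'] (PySem.List.slice parts (some i) none)))

-- ===== PRECONDITION & SPEC =====
def Spec_is_company_email (email : String) (company_domains : List String) (out : Bool) : Prop := out = is_company_email_alt email company_domains
instance (email : String) (company_domains : List String) (out : Bool) : Decidable (Spec_is_company_email email company_domains out) := by unfold Spec_is_company_email; infer_instance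

-- ===== CLAIM (what is proved, stated in full; the proofs are below) =====
def Claim_equal_is_company_email : Prop := ∀ (email : String) (company_domains : List String), Dom_is_company_email email company_domains → Spec_is_company_email email company_domains (is_company_email email company_domains)

-- ===== LEMMAS AND PROOFS =====

-- prepend p to the first block of a block list ([] gets a single block [p])
def pvConsHead (p : List Char) : List (List Char) → List (List Char)
  | [] => [p]
  | h :: t => (p ++ h) :: t

-- structural (cons-step) form of Python's split on "."
def pvSplitDot : List Char → List (List Char)
  | [] => [[]]
  | c :: l => if c = '.' then [] :: pvSplitDot l else pvConsHead [c] (pvSplitDot l)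

-- the candidate list B enumerates: ".".join(parts[i:]) for each i
def pvTailJoins : List (List Char) → List (List Char)
  | [] => []
  | p :: ps => PySem.Chars.join ['.'] (p :: ps) :: pvTailJoins ps

theorem pvSplitDot_ne_nil (l : List Char) : pvSplitDot l ≠ [] := by
  cases l with
  | nil => simp [pvSplitDot]
  | cons c l =>
    simp only [pvSplitDot]
    split
    · simp
    · cases h : pvSplitDot l <;> simp [pvConsHead]

theorem pvConsHead_consHead (p q : List Char) (l : List (List Char)) :
    pvConsHead p (pvConsHead q l) = pvConsHead (p ++ q) l := by
  cases l <;> simp [pvConsHead, List.append_assoc]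

theorem pvSplitOn_go_spec (fuel : Nat) (l cur : List Char) (acc : List (List Char))
    (h : l.length < fuel) :
    PySem.Chars.splitOn.go ['.'] fuel l cur acc
      = acc.reverse ++ pvConsHead cur.reverse (pvSplitDot l) := by
  induction fuel generalizing l cur acc with
  | zero => omega
  | succ f ih =>
    cases l with
    | nil =>
      simp [PySem.Chars.splitOn.go, pvSplitDot, pvConsHead]
    | cons c rest =>
      simp only [PySem.Chars.splitOn.go]
      by_cases hc : c = '.'
      · subst hc
        simp only [List.isPrefixOf, BEq.rfl, Bool.true_and, if_pos]
        rw [ih _ _ _ (by simp at h ⊢; omega)]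
        · obtain ⟨hd, tl, hsp⟩ := List.exists_cons_of_ne_nil (pvSplitDot_ne_nil rest)
          simp [pvSplitDot, hsp, pvConsHead, List.reverse_cons]
      · have hpre : List.isPrefixOf ['.'] (c :: rest) = false := by
          simp [List.isPrefixOf]
          exact fun h' => absurd h'.symm hc
        rw [if_neg (by simp [hpre])]
        rw [ih rest (c :: cur) acc (by simp at h; omega)]
        have : (c :: cur).reverse = cur.reverse ++ [c] := by simp
        rw [this, ← pvConsHead_consHead]
        simp [pvSplitDot, hc]

theorem pvSplitOn_eq (l : List Char) : PySem.Chars.splitOn l ['.'] = pvSplitDot l := by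
  unfold PySem.Chars.splitOn
  rw [pvSplitOn_go_spec _ _ _ _ (by omega)]
  obtain ⟨hd, tl, hsp⟩ := List.exists_cons_of_ne_nil (pvSplitDot_ne_nil l)
  simp [hsp, pvConsHead]

theorem pvJoin_splitDot (l : List Char) : PySem.Chars.join ['.'] (pvSplitDot l) = l := by
  induction l with
  | nil => simp [pvSplitDot, PySem.Chars.join_singleton]
  | cons c rest ih =>
    obtain ⟨hd, tl, hsp⟩ := List.exists_cons_of_ne_nil (pvSplitDot_ne_nil rest)
    rw [hsp] at ih
    by_cases hc : c = '.'
    · subst hc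
      rw [show pvSplitDot ('.' :: rest) = [] :: pvSplitDot rest from by simp [pvSplitDot], hsp,
        PySem.Chars.join_cons_cons]
      simpa using ih
    · rw [show pvSplitDot (c :: rest) = pvConsHead [c] (pvSplitDot rest) from by
        simp [pvSplitDot, hc], hsp]
      simp only [pvConsHead, List.singleton_append]
      cases tl with
      | nil =>
        rw [PySem.Chars.join_singleton] at ih ⊢
        simp [ih]
      | cons t0 ts =>
        rw [PySem.Chars.join_cons_cons] at ih ⊢
        simp only [List.cons_append]
        rw [ih]

theorem pvTailJoins_tail_mem (l : List Char) (s : List Char) :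
    s ∈ pvTailJoins ((pvSplitDot l).tail) ↔ ∃ pre, pre ++ '.' :: s = l := by
  induction l generalizing s with
  | nil =>
    simp [pvSplitDot, pvTailJoins]
  | cons c rest ih =>
    obtain ⟨hd, tl, hsp⟩ := List.exists_cons_of_ne_nil (pvSplitDot_ne_nil rest)
    by_cases hc : c = '.'
    · subst hc
      rw [show pvSplitDot ('.' :: rest) = [] :: pvSplitDot rest from by simp [pvSplitDot],
        List.tail_cons, hsp]
      have hjoin : PySem.Chars.join ['.'] (hd :: tl) = rest := by
        rw [← hsp]; exact pvJoin_splitDot rest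
      simp only [pvTailJoins, List.mem_cons, hjoin]
      constructor
      · rintro (rfl | h)
        · exact ⟨[], rfl⟩
        · obtain ⟨pre, hpre⟩ := (ih s).mp (by rw [hsp]; simpa using h)
          exact ⟨'.' :: pre, by simp [hpre]⟩
      · rintro ⟨pre, hpre⟩
        cases pre with
        | nil =>
          left
          simp at hpre
          exact hpre
        | cons p ps =>
          right
          injection hpre with h1 h2
          have h3 := (ih s).mpr ⟨ps, h2⟩
          rw [hsp] at h3
          simpa using h3
    · rw [show pvSplitDot (c :: rest) = pvConsHead [c] (pvSplitDot rest) from by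
        simp [pvSplitDot, hc], hsp]
      simp only [pvConsHead, List.singleton_append, List.tail_cons]
      have htl : tl = (pvSplitDot rest).tail := by rw [hsp, List.tail_cons]
      rw [htl, ih s]
      constructor
      · rintro ⟨pre, hpre⟩; exact ⟨c :: pre, by simp [hpre]⟩
      · rintro ⟨pre, hpre⟩
        cases pre with
        | nil =>
          simp only [List.nil_append] at hpre
          injection hpre with h1 _
          exact absurd h1.symm hc
        | cons p ps =>
          injection hpre with h1 h2
          exact ⟨ps, h2⟩

theorem pvTailJoins_mem (l : List Char) (s : List Char) :
    s ∈ pvTailJoins (pvSplitDot l) ↔ s = l ∨ ∃ pre, pre ++ '.' :: s = l := by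
  obtain ⟨hd, tl, hsp⟩ := List.exists_cons_of_ne_nil (pvSplitDot_ne_nil l)
  have hjoin : PySem.Chars.join ['.'] (hd :: tl) = l := by rw [← hsp]; exact pvJoin_splitDot l
  rw [hsp]
  simp only [pvTailJoins, List.mem_cons, hjoin]
  have := pvTailJoins_tail_mem l s
  rw [hsp] at this
  simp only [List.tail_cons] at this
  rw [this]

theorem pvTailJoins_eq_map_range (ps : List (List Char)) :
    pvTailJoins ps = (List.range ps.length).map (fun i => PySem.Chars.join ['.'] (ps.drop i)) := by
  induction ps with
  | nil => simp [pvTailJoins]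
  | cons p ps ih =>
    simp only [pvTailJoins, List.length_cons, List.range_succ_eq_map, List.map_cons,
      List.map_map, List.drop_zero]
    rw [ih]
    rfl

-- ===== VERDICT (by name: the statement is the Claim_ definition above) =====
theorem is_company_email_spec : Claim_equal_is_company_email := by
  intro email company_domains _
  unfold Spec_is_company_email is_company_email is_company_email_alt
  by_cases hg : email.toList.isEmpty || !(PySem.Chars.isIn ['@'] email.toList)
  · simp [hg]
  · rw [if_neg hg, if_neg hg]
    set domain := PySem.Chars.lower (PySem.List.pyGetD (PySem.Chars.splitOn email.toList ['@']) (-1) []) with hd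
    rw [Bool.eq_iff_iff]
    simp only [List.any_eq_true]
    rw [pvSplitOn_eq domain]
    constructor
    · rintro ⟨c, hc, hmatch⟩
      simp only [Bool.or_eq_true, beq_iff_eq] at hmatch
      have hmem : PySem.Chars.lower c.toList ∈ pvTailJoins (pvSplitDot domain) := by
        rw [pvTailJoins_mem]
        rcases hmatch with h | h
        · left; exact h.symm
        · right
          have := (PySem.Chars.endswith_iff _ _).mp h
          exact this
      rw [pvTailJoins_eq_map_range, List.mem_map] at hmem
      obtain ⟨i, hi, hjoin⟩ := hmem
      rw [List.mem_range] at hi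
      refine ⟨(i : Int), ?_, ?_⟩
      · rw [PySem.List.pyRange_zero_natCast, List.mem_map]
        exact ⟨i, List.mem_range.mpr hi, rfl⟩
      · rw [PySem.List.slice_from_natCast, hjoin]
        simp only [PySem.Set.contains, List.contains_eq_mem, decide_eq_true_eq,
          PySem.Set.mem_ofList, List.mem_map]
        exact ⟨c, hc, rfl⟩
    · rintro ⟨i, hi, hcontains⟩
      rw [PySem.List.pyRange_zero_natCast, List.mem_map] at hi
      obtain ⟨j, hj, rfl⟩ := hi
      rw [List.mem_range] at hj
      rw [PySem.List.slice_from_natCast] at hcontains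
      simp only [PySem.Set.contains, List.contains_eq_mem, decide_eq_true_eq,
        PySem.Set.mem_ofList, List.mem_map] at hcontains
      obtain ⟨c, hc, hlow⟩ := hcontains
      refine ⟨c, hc, ?_⟩
      simp only [Bool.or_eq_true, beq_iff_eq]
      have hmem : PySem.Chars.lower c.toList ∈ pvTailJoins (pvSplitDot domain) := by
        rw [pvTailJoins_eq_map_range, List.mem_map]
        exact ⟨j, List.mem_range.mpr hj, hlow.symm⟩
      rw [pvTailJoins_mem] at hmem
      rcases hmem with h | h
      · left; exact h.symm
      · right; exact (PySem.Chars.endswith_iff _ _).mpr h
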